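-- pv_equiv track=rewrite | github.com/xihangmeng210/hypermotif-extraction | hypermotif.py | split_into_k_parts
-- ===== SOURCE A (Python) =====
-- def split_into_k_parts(M, k):
--     part_size = M // k
--     result = []
--     start = 0
--     for i in range(k):
--         end = start + part_size
--         if i < M % k:
--             end += 1
--         result.append(list(range(start, end)))
--         start = end
--     return result
-- ===== SOURCE B (Python) =====
-- def split_into_k_parts(M, k):
--     q, r = divmod(M, k)
--     return [list(range(i * q + min(i, r), (i + 1) * q + min(i + 1, r)))
--             for i in range(k)]
-- ===== Notes on version B (the rewrite author's own statement) =====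
-- stated objective: simpler
-- what changed: The sequential start/end accumulator loop is replaced by a single comprehension computing each part's bounds directly from its index via a closed-form formula i*q + min(i, r).
import Mathlib
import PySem

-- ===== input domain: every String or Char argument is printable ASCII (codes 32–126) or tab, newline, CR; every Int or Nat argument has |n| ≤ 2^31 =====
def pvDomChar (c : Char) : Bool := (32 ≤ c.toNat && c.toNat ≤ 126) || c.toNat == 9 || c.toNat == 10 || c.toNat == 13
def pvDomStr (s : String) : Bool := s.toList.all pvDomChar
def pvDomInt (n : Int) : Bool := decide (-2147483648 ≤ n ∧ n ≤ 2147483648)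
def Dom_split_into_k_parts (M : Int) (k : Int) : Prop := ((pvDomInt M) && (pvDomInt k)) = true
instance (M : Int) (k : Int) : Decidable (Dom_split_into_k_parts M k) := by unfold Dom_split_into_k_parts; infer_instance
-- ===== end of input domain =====

-- B replaces A's running start/end accumulator by a per-index closed-form bound
-- start_i = i*q + min(i, r) (objective: simpler, a stateless comprehension).

-- ===== PORT A =====
def split_into_k_parts (M : Int) (k : Int) : List (List Int) :=
  let part_size := PySem.Int.floordiv M k
  let st := (PySem.List.pyRange 0 k 1).foldl
    (fun (st : List (List Int) × Int) i =>
      let start := st.2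
      let e := start + part_size
      let e := if i < PySem.Int.mod M k then e + 1 else e
      (st.1 ++ [PySem.List.pyRange start e 1], e))
    ([], 0)
  st.1

-- ===== PORT B =====
def split_into_k_parts_alt (M : Int) (k : Int) : List (List Int) :=
  match PySem.Int.divmod? M k with
  | none => []   -- k = 0: Python raises ZeroDivisionError (excluded by Pre_)
  | some (q, r) =>
    (PySem.List.pyRange 0 k 1).map (fun i =>
      PySem.List.pyRange (i * q + min i r) ((i + 1) * q + min (i + 1) r) 1)

-- ===== PRECONDITION & SPEC =====
-- Pre_ excludes exactly k = 0, where both Pythons raise ZeroDivisionError.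
def Pre_split_into_k_parts (M : Int) (k : Int) : Prop := k ≠ 0
instance (M : Int) (k : Int) : Decidable (Pre_split_into_k_parts M k) := by
  unfold Pre_split_into_k_parts; infer_instance
def pvWitness_split_into_k_parts : Int × Int := (10, 3)

def Spec_split_into_k_parts (M : Int) (k : Int) (out : List (List Int)) : Prop := out = split_into_k_parts_alt M k
instance (M : Int) (k : Int) (out : List (List Int)) : Decidable (Spec_split_into_k_parts M k out) := by unfold Spec_split_into_k_parts; infer_instance

-- ===== CLAIM (what is proved, stated in full; the proofs are below) =====
def Claim_equal_split_into_k_parts : Prop := ∀ (M : Int) (k : Int), Dom_split_into_k_parts M k → Pre_split_into_k_parts M k → Spec_split_into_k_parts M k (split_into_k_parts M k)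

-- ===== LEMMAS AND PROOFS =====

-- The closed-form start of part i.
def pvStart (q r i : Int) : Int := i * q + min i r

theorem pvStart_step (q r i : Int) :
    (if i < r then pvStart q r i + q + 1 else pvStart q r i + q) = pvStart q r (i + 1) := by
  unfold pvStart
  rcases lt_or_ge i r with h | h
  · simp only [if_pos h]
    have h1 : min i r = i := min_eq_left (le_of_lt h)
    have h2 : min (i + 1) r = i + 1 := min_eq_left (by omega)
    rw [h1, h2]; ring
  · simp only [if_neg (not_lt.mpr h)]
    have h1 : min i r = r := min_eq_right h
    have h2 : min (i + 1) r = r := min_eq_right (by omega)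
    rw [h1, h2]; ring

-- Loop invariant: folding A's (zeta-reduced) body over pyRange a b 1 starting
-- from (acc, pvStart q r a) appends exactly B's per-index parts.
theorem pvLoop (q r : Int) (b : Int) : ∀ (n : Nat) (a : Int), (b - a).toNat = n →
    ∀ (acc : List (List Int)),
    (PySem.List.pyRange a b 1).foldl
      (fun (st : List (List Int) × Int) i =>
        (st.1 ++ [PySem.List.pyRange st.2 (if i < r then st.2 + q + 1 else st.2 + q) 1],
         if i < r then st.2 + q + 1 else st.2 + q))
      (acc, pvStart q r a)
    = (acc ++ (PySem.List.pyRange a b 1).map (fun i =>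
        PySem.List.pyRange (i * q + min i r) ((i + 1) * q + min (i + 1) r) 1),
       pvStart q r (max a b)) := by
  intro n
  induction n with
  | zero =>
    intro a ha acc
    have hba : b ≤ a := by omega
    rw [PySem.List.pyRange_one_eq_nil hba]
    simp [max_eq_left hba]
  | succ m ih =>
    intro a ha acc
    have hab : a < b := by omega
    rw [PySem.List.pyRange_one_cons hab]
    simp only [List.foldl_cons, List.map_cons]
    rw [pvStart_step q r a]
    rw [ih (a + 1) (by omega)]
    rw [max_eq_right (by omega : a + 1 ≤ b), max_eq_right hab.le]
    simp only [List.append_assoc, List.singleton_append]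
    simp [pvStart]

theorem pvDivmod (M k : Int) (hk : k ≠ 0) :
    PySem.Int.divmod? M k = some (PySem.Int.floordiv M k, PySem.Int.mod M k) := by
  simp [PySem.Int.divmod?, hk, PySem.Int.floordiv, PySem.Int.mod]

-- ===== VERDICT (by name: the statement is the Claim_ definition above) =====
theorem split_into_k_parts_spec : Claim_equal_split_into_k_parts := by
  intro M k _ hk
  unfold Spec_split_into_k_parts
  simp only [split_into_k_parts, split_into_k_parts_alt, pvDivmod M k hk]
  by_cases hk0 : k ≤ 0
  · rw [PySem.List.pyRange_one_eq_nil hk0]; simp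
  · replace hk0 : 0 < k := by omega
    have h0 : pvStart (PySem.Int.floordiv M k) (PySem.Int.mod M k) 0 = 0 := by
      unfold pvStart
      have : 0 ≤ PySem.Int.mod M k := PySem.Int.mod_nonneg M hk0
      simp [min_eq_left this]
    have := pvLoop (PySem.Int.floordiv M k) (PySem.Int.mod M k) k (k - 0).toNat 0 rfl []
    rw [h0] at this
    rw [this]
    simp
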